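-- pv_equiv track=rewrite | github.com/lingk7/mnsbt2eas | Source/texture2d exactor and stick.py | find_default_face_combo
-- ===== SOURCE A (Python) =====
-- def is_complete_face_combination(components):
--     """判断组合是否包含完整的五官（眼睛和嘴巴）"""
--     has_eye = any('eye' in comp.lower() for comp in components)
--     has_mouth = any('mouth' in comp.lower() for comp in components)
--     return has_eye and has_mouth
--
-- def find_default_face_combo(compositions_dict):
--     """寻找默认的表情组合"""
--     # 优先寻找Normal相关的组合
--     for key, components in compositions_dict.items():
--         if 'Normal' in key and is_complete_face_combination(components):
--             return components
--
--     # 如果没有Normal，返回第一个完整表情组合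
--     for key, components in compositions_dict.items():
--         if is_complete_face_combination(components):
--             return components
--
--     return None
-- ===== SOURCE B (Python) =====
-- def find_default_face_combo(compositions_dict):
--     """One-pass search: return the first complete 'Normal' combo immediately,
--     remembering the first complete combo as a fallback."""
--     fallback = None
--     for key, components in compositions_dict.items():
--         complete = all(
--             any(tag in comp.lower() for comp in components)
--             for tag in ('eye', 'mouth')
--         )
--         if 'Normal' in key and complete:
--             return components
--         if fallback is None and complete:
--             fallback = components
--     return fallback
-- ===== Notes on version B (the rewrite author's own statement) =====
-- stated objective: alternative
-- what changed: Replaces A's two sequential passes (first for Normal-complete, then for any complete) by a single pass that returns a complete Normal combo immediately and records the first complete combo as a fallback.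
import Mathlib
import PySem

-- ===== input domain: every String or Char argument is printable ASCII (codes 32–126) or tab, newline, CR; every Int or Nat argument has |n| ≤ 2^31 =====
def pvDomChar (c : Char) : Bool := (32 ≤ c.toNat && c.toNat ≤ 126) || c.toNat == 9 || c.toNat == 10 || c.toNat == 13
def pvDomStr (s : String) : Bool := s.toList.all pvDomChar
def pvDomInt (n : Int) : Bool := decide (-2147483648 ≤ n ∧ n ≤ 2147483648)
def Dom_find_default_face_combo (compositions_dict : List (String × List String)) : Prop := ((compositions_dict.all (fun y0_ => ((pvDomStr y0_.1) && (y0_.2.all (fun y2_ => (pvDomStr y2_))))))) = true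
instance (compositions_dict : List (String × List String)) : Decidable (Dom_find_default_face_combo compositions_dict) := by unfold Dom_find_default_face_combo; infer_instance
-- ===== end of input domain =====

-- B replaces A's two sequential passes by one pass with a first-complete fallback; same results, alternative decomposition.


-- ===== PORT A =====
-- helper: is_complete_face_combination(components)
def is_complete_face_combination (components : List String) : Bool :=
  let has_eye := components.any (fun comp => PySem.Str.isIn "eye" (PySem.Str.lower comp))
  let has_mouth := components.any (fun comp => PySem.Str.isIn "mouth" (PySem.Str.lower comp))
  has_eye && has_mouth

-- first loop of A: look for a complete 'Normal' combo
def pvFindNormal : List (String × List String) → Option (List String)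
  | [] => none
  | (key, components) :: rest =>
      if PySem.Str.isIn "Normal" key && is_complete_face_combination components then
        some components
      else pvFindNormal rest

-- second loop of A: look for any complete combo
def pvFindComplete : List (String × List String) → Option (List String)
  | [] => none
  | (_, components) :: rest =>
      if is_complete_face_combination components then some components
      else pvFindComplete rest

def find_default_face_combo (compositions_dict : List (String × List String)) : Option (List String) :=
  match pvFindNormal compositions_dict with
  | some components => some components
  | none =>
    match pvFindComplete compositions_dict with
    | some components => some components
    | none => none

-- ===== PORT B =====
-- B's completeness test: all(any(tag in comp.lower() …) for tag in ('eye','mouth'))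
def pvCompleteB (components : List String) : Bool :=
  ["eye", "mouth"].all (fun tag =>
    components.any (fun comp => PySem.Str.isIn tag (PySem.Str.lower comp)))

-- B's single loop, carrying the fallback
def pvAltLoop : List (String × List String) → Option (List String) → Option (List String)
  | [], fallback => fallback
  | (key, components) :: rest, fallback =>
      let complete := pvCompleteB components
      if PySem.Str.isIn "Normal" key && complete then some components
      else pvAltLoop rest (if fallback.isNone && complete then some components else fallback)

def find_default_face_combo_alt (compositions_dict : List (String × List String)) : Option (List String) :=
  pvAltLoop compositions_dict none

-- ===== PRECONDITION & SPEC =====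
def Spec_find_default_face_combo (compositions_dict : List (String × List String)) (out : Option (List String)) : Prop := out = find_default_face_combo_alt compositions_dict
instance (compositions_dict : List (String × List String)) (out : Option (List String)) : Decidable (Spec_find_default_face_combo compositions_dict out) := by unfold Spec_find_default_face_combo; infer_instance

-- ===== CLAIM (what is proved, stated in full; the proofs are below) =====
def Claim_equal_find_default_face_combo : Prop := ∀ (compositions_dict : List (String × List String)), Dom_find_default_face_combo compositions_dict → Spec_find_default_face_combo compositions_dict (find_default_face_combo compositions_dict)

-- ===== LEMMAS AND PROOFS =====
-- B's completeness test equals A's helper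
theorem pvCompleteB_eq (components : List String) :
    pvCompleteB components = is_complete_face_combination components := by
  simp [pvCompleteB, is_complete_face_combination]

-- characterisation of B's loop: Normal hit wins; otherwise the fallback, else the first complete combo
theorem pvAltLoop_eq (l : List (String × List String)) (fb : Option (List String)) :
    pvAltLoop l fb =
      match pvFindNormal l with
      | some c => some c
      | none => match fb with
        | some c => some c
        | none => pvFindComplete l := by
  induction l generalizing fb with
  | nil => cases fb <;> simp [pvAltLoop, pvFindNormal, pvFindComplete]
  | cons h t ih =>
    obtain ⟨key, components⟩ := h
    by_cases hk : PySem.Chars.isIn ['N', 'o', 'r', 'm', 'a', 'l'] key.toList = true <;>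
      by_cases hc : is_complete_face_combination components = true <;>
      cases fb <;>
      simp [pvAltLoop, pvFindNormal, pvFindComplete, pvCompleteB_eq, hk, hc, ih]
-- ===== VERDICT (by name: the statement is the Claim_ definition above) =====
theorem find_default_face_combo_spec : Claim_equal_find_default_face_combo := by
  intro d _
  unfold Spec_find_default_face_combo find_default_face_combo find_default_face_combo_alt
  rw [pvAltLoop_eq]
  cases hn : pvFindNormal d <;> cases hc : pvFindComplete d <;> simp
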